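-- pv_equiv track=rewrite | github.com/ansible-collections/community.crypto | plugins/module_utils/_crypto/cryptography_support.py | _dn_escape_value
-- ===== SOURCE A (Python) =====
-- def _dn_escape_value(value: str) -> str:
--     """
--     Escape Distinguished Name's attribute value.
--     """
--     value = value.replace("\\", "\\\\")
--     for ch in [",", "+", "<", ">", ";", '"']:
--         value = value.replace(ch, f"\\{ch}")
--     value = value.replace("\0", "\\00")
--     if value.startswith((" ", "#")):
--         value = f"\\{value[0]}{value[1:]}"
--     if value.endswith(" "):
--         value = f"{value[:-1]}\\ "
--     return value
-- ===== SOURCE B (Python) =====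
-- def _dn_escape_value(value: str) -> str:
--     table = {
--         "\\": "\\\\", ",": "\\,", "+": "\\+", "<": "\\<",
--         ">": "\\>", ";": "\\;", '"': '\\"', "\0": "\\00",
--     }
--     out = "".join(table.get(c, c) for c in value)
--     if out[:1] in (" ", "#"):
--         out = "\\" + out
--     if out[-1:] == " ":
--         out = out[:-1] + "\\ "
--     return out
-- ===== Notes on version B (the rewrite author's own statement) =====
-- stated objective: alternative
-- what changed: Replaces A's eight sequential str.replace scans by a single pass that expands each character through a precomputed lookup table, with the same leading/trailing fixups applied to the result.
import Mathlib
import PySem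

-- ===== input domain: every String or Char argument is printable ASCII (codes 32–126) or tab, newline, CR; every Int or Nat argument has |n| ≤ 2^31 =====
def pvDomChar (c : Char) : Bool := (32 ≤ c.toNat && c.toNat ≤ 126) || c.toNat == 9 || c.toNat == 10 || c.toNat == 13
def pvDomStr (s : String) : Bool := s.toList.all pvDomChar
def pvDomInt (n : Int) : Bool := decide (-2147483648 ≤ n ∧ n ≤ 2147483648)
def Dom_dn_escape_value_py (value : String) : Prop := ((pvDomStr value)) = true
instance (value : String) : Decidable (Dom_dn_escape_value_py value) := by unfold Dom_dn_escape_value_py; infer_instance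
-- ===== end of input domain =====

-- B replaces A's eight sequential .replace scans by a single-pass lookup-table escape
-- (objective: alternative — one traversal instead of eight, same return value).

-- ===== PORT A =====
-- transliteration of A: chained replaces, then the two fixups.
-- 'value.startswith((" ", "#"))' on a tuple is the OR of the two startswith tests;
-- 'value[0]' is unreachable-on-empty inside that guard (pyGet? none mapped to "").
def dn_escape_value_py (value : String) : String :=
  let v1 := PySem.Str.replace value "\\" "\\\\"
  let v2 := [",", "+", "<", ">", ";", "\""].foldl
    (fun v ch => PySem.Str.replace v ch ("\\" ++ ch)) v1
  let v3 := PySem.Str.replace v2 "\x00" "\\00"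
  let v4 :=
    if PySem.Str.startswith v3 " " || PySem.Str.startswith v3 "#" then
      "\\" ++ ((PySem.Str.pyGet? v3 0).map (fun c => String.singleton c)).getD ""
        ++ PySem.Str.slice v3 (some 1) none
    else v3
  if PySem.Str.endswith v4 " " then
    PySem.Str.slice v4 none (some (-1)) ++ "\\ "
  else v4

-- ===== PORT B =====
-- B's lookup table (Python dict 'table')
def pvEscTable : PySem.Dict Char (List Char) := PySem.Dict.ofList
  [('\\', ['\\', '\\']), (',', ['\\', ',']), ('+', ['\\', '+']), ('<', ['\\', '<']),
   ('>', ['\\', '>']), (';', ['\\', ';']), ('"', ['\\', '"']), ('\x00', ['\\', '0', '0'])]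

def dn_escape_value_py_alt (value : String) : String :=
  let out := value.toList.flatMap (fun c => (PySem.Dict.get? pvEscTable c).getD [c])
  let out2 :=
    if PySem.List.slice out none (some 1) = [' '] || PySem.List.slice out none (some 1) = ['#'] then
      '\\' :: out
    else out
  let out3 :=
    if PySem.List.slice out2 (some (-1)) none = [' '] then
      PySem.List.slice out2 none (some (-1)) ++ ['\\', ' ']
    else out2
  String.ofList out3

-- ===== PRECONDITION & SPEC =====
def Spec_dn_escape_value_py (value : String) (out : String) : Prop := out = dn_escape_value_py_alt value
instance (value : String) (out : String) : Decidable (Spec_dn_escape_value_py value out) := by unfold Spec_dn_escape_value_py; infer_instance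

-- ===== CLAIM (what is proved, stated in full; the proofs are below) =====
def Claim_equal_dn_escape_value_py : Prop := ∀ (value : String), Dom_dn_escape_value_py value → Spec_dn_escape_value_py value (dn_escape_value_py value)

-- ===== LEMMAS AND PROOFS =====

-- a single-character pattern replace is a per-character expansion
theorem replace_go_single (a : Char) (w : List Char) :
    ∀ (l : List Char) (fuel : Nat) (acc : List Char), l.length ≤ fuel →
      PySem.Chars.replace.go [a] w fuel l acc
        = acc.reverse ++ l.flatMap (fun c => if c = a then w else [c]) := by
  intro l
  induction l with
  | nil =>
    intro fuel acc _
    cases fuel <;> simp [PySem.Chars.replace.go]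
  | cons c t ih =>
    intro fuel acc h
    cases fuel with
    | zero => simp at h
    | succ f =>
      by_cases hc : a = c
      · subst hc
        have hp : [a].isPrefixOf (a :: t) = true := by simp [List.isPrefixOf]
        simp only [PySem.Chars.replace.go, hp, if_pos]
        have hd : List.drop [a].length (a :: t) = t := rfl
        rw [hd, ih f (w.reverse ++ acc) (by simpa using h)]
        simp
      · have hp : [a].isPrefixOf (c :: t) = false := by
          simp [List.isPrefixOf]
          exact hc
        simp only [PySem.Chars.replace.go, hp, Bool.false_eq_true, if_false]
        rw [ih f (c :: acc) (by simpa using h)]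
        simp [Ne.symm hc]

theorem replace_single (l : List Char) (a : Char) (w : List Char) :
    PySem.Chars.replace l [a] w = l.flatMap (fun c => if c = a then w else [c]) := by
  simpa [PySem.Chars.replace] using replace_go_single a w l l.length [] (le_refl _)

-- the per-character composition of A's eight replaces equals B's table lookup
theorem chain_char (c : Char) :
    ((((((((if c = '\\' then ['\\', '\\'] else [c]).flatMap
      (fun c => if c = ',' then ['\\', ','] else [c])).flatMap
      (fun c => if c = '+' then ['\\', '+'] else [c])).flatMap
      (fun c => if c = '<' then ['\\', '<'] else [c])).flatMap
      (fun c => if c = '>' then ['\\', '>'] else [c])).flatMap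
      (fun c => if c = ';' then ['\\', ';'] else [c])).flatMap
      (fun c => if c = '"' then ['\\', '"'] else [c])).flatMap
      (fun c => if c = '\x00' then ['\\', '0', '0'] else [c]))
      = (PySem.Dict.get? pvEscTable c).getD [c] := by
  by_cases h1 : c = '\\'; · subst h1; decide
  by_cases h2 : c = ','; · subst h2; decide
  by_cases h3 : c = '+'; · subst h3; decide
  by_cases h4 : c = '<'; · subst h4; decide
  by_cases h5 : c = '>'; · subst h5; decide
  by_cases h6 : c = ';'; · subst h6; decide
  by_cases h7 : c = '"'; · subst h7; decide
  by_cases h8 : c = '\x00'; · subst h8; decide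
  have hitems : pvEscTable.items =
      [('\\', ['\\', '\\']), (',', ['\\', ',']), ('+', ['\\', '+']), ('<', ['\\', '<']),
       ('>', ['\\', '>']), (';', ['\\', ';']), ('"', ['\\', '"']), ('\x00', ['\\', '0', '0'])] := by
    decide
  have g : ∀ a : Char, ¬ c = a → (a == c) = false :=
    fun a h => beq_eq_false_iff_ne.mpr (Ne.symm h)
  simp [PySem.Dict.get?, hitems, List.find?, g _ h1, g _ h2, g _ h3, g _ h4,
    g _ h5, g _ h6, g _ h7, g _ h8, h1, h2, h3, h4, h5, h6, h7, h8]

-- the whole escaped body: A's eight passes = B's one pass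
theorem body_eq (l : List Char) :
    ((((((((l.flatMap (fun c => if c = '\\' then ['\\', '\\'] else [c])).flatMap
      (fun c => if c = ',' then ['\\', ','] else [c])).flatMap
      (fun c => if c = '+' then ['\\', '+'] else [c])).flatMap
      (fun c => if c = '<' then ['\\', '<'] else [c])).flatMap
      (fun c => if c = '>' then ['\\', '>'] else [c])).flatMap
      (fun c => if c = ';' then ['\\', ';'] else [c])).flatMap
      (fun c => if c = '"' then ['\\', '"'] else [c])).flatMap
      (fun c => if c = '\x00' then ['\\', '0', '0'] else [c]))
      = l.flatMap (fun c => (PySem.Dict.get? pvEscTable c).getD [c]) := by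
  induction l with
  | nil => simp
  | cons c t ih =>
    simp only [List.flatMap_cons, List.flatMap_append]
    rw [ih, chain_char]

-- leading-fixup guard: single-char prefix test = take-1 test
theorem lead_guard (l : List Char) (a : Char) :
    PySem.Chars.startswith l [a] = decide (l.take 1 = [a]) := by
  cases l with
  | nil => simp [PySem.Chars.startswith, List.isPrefixOf]
  | cons c t =>
    by_cases h : a = c
    · subst h; simp [PySem.Chars.startswith, List.isPrefixOf]
    · simp [PySem.Chars.startswith, List.isPrefixOf, h, Ne.symm h]

-- trailing-fixup guard: ends-with-space = last element is a space
theorem trail_guard (l : List Char) :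
    PySem.Chars.endswith l [' '] = decide (l.drop (l.length - 1) = [' ']) := by
  by_cases hd : l.drop (l.length - 1) = [' ']
  · have hs : [' '] <:+ l := ⟨l.take (l.length - 1), by rw [← hd, List.take_append_drop]⟩
    simp [hd, (PySem.Chars.endswith_iff l [' ']).mpr hs]
  · simp only [hd, decide_false]
    rcases Bool.eq_false_or_eq_true (PySem.Chars.endswith l [' ']) with h | h
    · obtain ⟨t, rfl⟩ := (PySem.Chars.endswith_iff _ [' ']).mp h
      exact absurd (by simp) hd
    · exact h

-- A's leading fixup on a string equals B's on the underlying character list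
theorem lead_eq (v3 : String) (L : List Char) (h3 : v3.toList = L) :
    (if PySem.Str.startswith v3 " " || PySem.Str.startswith v3 "#" then
        "\\" ++ ((PySem.Str.pyGet? v3 0).map (fun c => String.singleton c)).getD ""
          ++ PySem.Str.slice v3 (some 1) none
      else v3).toList
    = (if PySem.List.slice L none (some 1) = [' '] || PySem.List.slice L none (some 1) = ['#'] then
        '\\' :: L
      else L) := by
  have hsl : PySem.List.slice L none (some 1) = L.take 1 := by
    rw [PySem.List.slice_to L (by norm_num)]
    rfl
  rw [hsl, PySem.Str.startswith_eq, PySem.Str.startswith_eq, h3]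
  have h1 : (" " : String).toList = [' '] := by decide
  have h2 : ("#" : String).toList = ['#'] := by decide
  rw [h1, h2, lead_guard, lead_guard]
  by_cases hsp : L.take 1 = [' '] ∨ L.take 1 = ['#']
  · obtain ⟨c, t, rfl⟩ : ∃ c t, L = c :: t := by
      cases L with
      | nil => rcases hsp with h | h <;> simp at h
      | cons c t => exact ⟨c, t, rfl⟩
    have hget : PySem.List.pyGet? v3.toList 0 = some c := by
      rw [h3]; simp [PySem.List.pyGet?, PySem.List.pyIdx?]
    have hslice : (PySem.Str.slice v3 (some 1) none).toList = t := by
      rw [PySem.Str.toList_slice, PySem.Chars.slice_eq_listSlice, h3,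
        PySem.List.slice_from _ (by norm_num)]
      rfl
    rcases hsp with h | h <;> simp [h, hget, hslice]
  · obtain ⟨hA, hB⟩ := not_or.mp hsp
    simp [hA, hB, h3]

-- A's trailing fixup on a string equals B's on the underlying character list
theorem trail_eq (v4 : String) (M : List Char) (h4 : v4.toList = M) :
    (if PySem.Str.endswith v4 " " then PySem.Str.slice v4 none (some (-1)) ++ "\\ " else v4).toList
    = (if PySem.List.slice M (some (-1)) none = [' '] then
        PySem.List.slice M none (some (-1)) ++ ['\\', ' ']
      else M) := by
  rw [PySem.List.slice_from_neg_one, PySem.Str.endswith_eq, h4]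
  have h1 : (" " : String).toList = [' '] := by decide
  rw [h1, trail_guard]
  have hdl : (PySem.Str.slice v4 none (some (-1))).toList = M.dropLast := by
    rw [PySem.Str.slice_to_neg_one, h4]
  have h2 : ("\\ " : String).toList = ['\\', ' '] := by decide
  by_cases hd : M.drop (M.length - 1) = [' '] <;>
    simp [hd, hdl, h2, h4, PySem.List.slice_to_neg_one]

theorem dn_escape_main (value : String) :
    dn_escape_value_py value = dn_escape_value_py_alt value := by
  apply String.toList_inj.mp
  unfold dn_escape_value_py dn_escape_value_py_alt
  simp only [List.foldl]
  set L := value.toList.flatMap (fun c => (PySem.Dict.get? pvEscTable c).getD [c]) with hL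
  have h3 : (PySem.Str.replace
      (PySem.Str.replace (PySem.Str.replace (PySem.Str.replace (PySem.Str.replace
        (PySem.Str.replace (PySem.Str.replace (PySem.Str.replace value "\\" "\\\\")
          "," ("\\" ++ ",")) "+" ("\\" ++ "+")) "<" ("\\" ++ "<")) ">" ("\\" ++ ">"))
          ";" ("\\" ++ ";")) "\"" ("\\" ++ "\"")) "\x00" "\\00").toList = L := by
    simp only [PySem.Str.toList_replace, String.toList_append,
      show ("\\" : String).toList = ['\\'] from by decide,
      show ("\\\\" : String).toList = ['\\', '\\'] from by decide,
      show ("," : String).toList = [','] from by decide,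
      show ("+" : String).toList = ['+'] from by decide,
      show ("<" : String).toList = ['<'] from by decide,
      show (">" : String).toList = ['>'] from by decide,
      show (";" : String).toList = [';'] from by decide,
      show ("\"" : String).toList = ['"'] from by decide,
      show ("\x00" : String).toList = ['\x00'] from by decide,
      show ("\\00" : String).toList = ['\\', '0', '0'] from by decide,
      List.cons_append, List.nil_append, replace_single]
    rw [hL, ← body_eq]
  rw [trail_eq _ _ (lead_eq _ _ h3)]
  simp

-- ===== VERDICT (by name: the statement is the Claim_ definition above) =====
theorem dn_escape_value_py_spec : Claim_equal_dn_escape_value_py := by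
  intro value _
  exact dn_escape_main value
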